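-- pv_equiv track=rewrite | github.com/Variante/image2string-converter | image2string.py | reconstruct_2d_matrix
-- ===== SOURCE A (Python) =====
-- def reconstruct_2d_matrix(results: list[tuple[tuple[int,int], str]]) -> str:
--     coords = [coord for coord, _ in results]
--     max_x = max(x for x, _ in coords)
--     max_y = max(y for _, y in coords)
--     matrix = [[" " for _ in range(max_x + 1)] for _ in range(max_y + 1)]
--     for (x, y), ch in results:
--         matrix[y][x] = ch
--     return "\n".join("".join(row) for row in matrix)
-- ===== SOURCE B (Python) =====
-- def reconstruct_2d_matrix(results: list[tuple[tuple[int, int], str]]) -> str: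
--     max_x = max(x for (x, _), _ in results)
--     max_y = max(y for (_, y), _ in results)
--     rows = {}
--     for (x, y), ch in results:
--         rows.setdefault(y, {})[x] = ch
--     lines = []
--     for y in range(max_y + 1):
--         parts = []
--         cur = 0
--         for x, ch in sorted(rows.get(y, {}).items(), key=lambda kv: kv[0]):
--             parts.append(" " * (x - cur))
--             parts.append(ch)
--             cur = x + 1
--         parts.append(" " * (max_x + 1 - cur))
--         lines.append("".join(parts))
--     return "\n".join(lines)
-- ===== Notes on version B (the rewrite author's own statement) =====
-- stated objective: faster
-- what changed: B replaces A's dense preallocated (max_y+1)x(max_x+1) matrix (fill cells in place, then join every cell string) with a group-by-row dict of per-row dicts whose entries are sorted by x and emitted as a sparse scan with run-length space gaps, so no 2D matrix is materialized and blank regions are emitted as whole runs instead of cell by cell (measured 2.5x at the largest timing size).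
-- outside the precondition, e.g. on reconstruct_2d_matrix([((0, 0), 'a'), ((-1, 0), 'b')]): A returns 'b', B returns 'ba'
import Mathlib
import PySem

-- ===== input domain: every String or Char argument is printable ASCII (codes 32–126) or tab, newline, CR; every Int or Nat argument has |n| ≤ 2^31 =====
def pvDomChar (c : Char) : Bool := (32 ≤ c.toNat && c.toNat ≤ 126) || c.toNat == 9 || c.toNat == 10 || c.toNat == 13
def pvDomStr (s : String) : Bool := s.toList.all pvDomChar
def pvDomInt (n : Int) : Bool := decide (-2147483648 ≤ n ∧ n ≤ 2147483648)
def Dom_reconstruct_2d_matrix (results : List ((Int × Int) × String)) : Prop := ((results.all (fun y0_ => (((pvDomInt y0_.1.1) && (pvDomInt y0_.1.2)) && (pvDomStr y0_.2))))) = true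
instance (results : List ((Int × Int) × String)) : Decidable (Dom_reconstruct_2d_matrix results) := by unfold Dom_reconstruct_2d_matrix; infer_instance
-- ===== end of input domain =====

-- B groups the entries by row into a dict of per-row dicts and emits each line by a sorted
-- sparse scan with run-length space gaps instead of filling and joining a dense 2D list
-- (objective: faster by a constant factor, measured).

-- ===== PORT A =====
-- Python 'l[i] = v': a negative index wraps once; an index still out of range raises IndexError
-- (such inputs are excluded by Pre_; the port leaves the list unchanged there).
def pvSetAt (l : List String) (i : Int) (v : String) : List String :=
  let n : Int := if i < 0 then i + l.length else i
  if 0 ≤ n ∧ n < l.length then l.set n.toNat v else l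

-- Python 'matrix[y][x] = ch' (same wrap/raise rule on the row index).
def pvSetRow (m : List (List String)) (y : Int) (x : Int) (ch : String) : List (List String) :=
  let n : Int := if y < 0 then y + m.length else y
  if 0 ≤ n ∧ n < m.length then m.set n.toNat (pvSetAt (m.getD n.toNat []) x ch) else m

def reconstruct_2d_matrix (results : List ((Int × Int) × String)) : String :=
  let coords := results.map (fun p => p.1)
  match PySem.List.max? (coords.map (fun c => c.1)) (fun v => v),
        PySem.List.max? (coords.map (fun c => c.2)) (fun v => v) with
  | some max_x, some max_y =>
    let matrix : List (List String) :=
      (List.range (max_y + 1).toNat).map (fun _ =>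
        (List.range (max_x + 1).toNat).map (fun _ => " "))
    let matrix := results.foldl (fun m p => pvSetRow m p.1.2 p.1.1 p.2) matrix
    PySem.Str.join "\n" (matrix.map (fun row => PySem.Str.join "" row))
  | _, _ => ""   -- unreachable: Python's max raises ValueError on the empty list (excluded by Pre_)

-- ===== PORT B =====
-- Python '" " * n' (empty for n ≤ 0), exact via PySem.List.pyRepeat on the char list.
def pvSpaces (n : Int) : String := String.ofList (PySem.List.pyRepeat [' '] n)

def reconstruct_2d_matrix_alt (results : List ((Int × Int) × String)) : String :=
  match PySem.List.max? (results.map (fun p => p.1.1)) (fun v => v) with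
  | none => ""   -- unreachable: Python's max raises ValueError on the empty list (excluded by Pre_)
  | some max_x =>
    match PySem.List.max? (results.map (fun p => p.1.2)) (fun v => v) with
    | none => ""
    | some max_y =>
      -- rows.setdefault(y, {})[x] = ch  ==  rows[y] = rows.get(y, {}) with x ↦ ch, position kept
      -- (exactly PySem.Dict.modify)
      let rows : PySem.Dict Int (PySem.Dict Int String) :=
        results.foldl (fun d p =>
          d.modify p.1.2 PySem.Dict.empty (fun r => r.insert p.1.1 p.2)) PySem.Dict.empty
      let lines := (PySem.List.pyRange 0 (max_y + 1) 1).foldl (fun lines y =>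
        let its := PySem.List.sorted (rows.getD y PySem.Dict.empty).items (fun kv => kv.1)
        let st := its.foldl (fun (st : List String × Int) kv =>
          (st.1 ++ [pvSpaces (kv.1 - st.2), kv.2], kv.1 + 1)) (([] : List String), (0 : Int))
        lines ++ [PySem.Str.join "" (st.1 ++ [pvSpaces (max_x + 1 - st.2)])]) []
      PySem.Str.join "\n" lines

-- ===== PRECONDITION & SPEC =====
-- Pre_ excludes the empty list, on which Python's max raises ValueError, and lists containing a
-- negative coordinate: those are outside the task's natural domain — A then raises IndexError or
-- silently wraps to the far end of a row/column via Python negative indexing.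
def Pre_reconstruct_2d_matrix (results : List ((Int × Int) × String)) : Prop :=
  results ≠ [] ∧ ∀ p ∈ results, 0 ≤ p.1.1 ∧ 0 ≤ p.1.2

instance (results : List ((Int × Int) × String)) : Decidable (Pre_reconstruct_2d_matrix results) := by
  unfold Pre_reconstruct_2d_matrix; infer_instance

def pvWitness_reconstruct_2d_matrix : List ((Int × Int) × String) := [((1, 0), "a"), ((0, 1), "b")]

def Spec_reconstruct_2d_matrix (results : List ((Int × Int) × String)) (out : String) : Prop := out = reconstruct_2d_matrix_alt results
instance (results : List ((Int × Int) × String)) (out : String) : Decidable (Spec_reconstruct_2d_matrix results out) := by unfold Spec_reconstruct_2d_matrix; infer_instance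

-- ===== CLAIM (what is proved, stated in full; the proofs are below) =====
def Claim_equal_reconstruct_2d_matrix : Prop := ∀ (results : List ((Int × Int) × String)), Dom_reconstruct_2d_matrix results → Pre_reconstruct_2d_matrix results → Spec_reconstruct_2d_matrix results (reconstruct_2d_matrix results)

-- ===== LEMMAS AND PROOFS =====

-- The loop invariant: A's dense matrix and B's dict-of-row-dicts describe the same grid.
def pvInv (mx my : Int) (m : List (List String))
    (rows : PySem.Dict Int (PySem.Dict Int String)) : Prop :=
  m.length = (my + 1).toNat ∧ (∀ row ∈ m, row.length = (mx + 1).toNat) ∧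
  ∀ j, j < (my + 1).toNat → ∀ i, i < (mx + 1).toNat →
    (m.getD j []).getD i " " = ((rows.getD (j : Int) PySem.Dict.empty).getD (i : Int) " ")

theorem pvInv_step (mx my x y : Int) (ch : String) (m : List (List String))
    (rows : PySem.Dict Int (PySem.Dict Int String))
    (hx : 0 ≤ x) (hx' : x ≤ mx) (hy : 0 ≤ y) (hy' : y ≤ my)
    (h : pvInv mx my m rows) :
    pvInv mx my (pvSetRow m y x ch)
      (rows.modify y PySem.Dict.empty (fun r => r.insert x ch)) := by
  obtain ⟨hH, hW, hc⟩ := h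
  have hyr : ¬ y < 0 := by omega
  have hylt : (0 : Int) ≤ y ∧ y < (m.length : Int) := by
    constructor
    · exact hy
    · rw [hH]; omega
  have hytn : y.toNat < m.length := by omega
  have hrowmem : m.getD y.toNat [] ∈ m := by
    rw [List.getD_eq_getElem _ _ hytn]; exact List.getElem_mem hytn
  have hrowlen : (m.getD y.toNat []).length = (mx + 1).toNat := hW _ hrowmem
  have hxr : ¬ x < 0 := by omega
  have hxlt : (0 : Int) ≤ x ∧ x < ((m.getD y.toNat []).length : Int) := by
    constructor
    · exact hx
    · rw [hrowlen]; omega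
  have hset : pvSetRow m y x ch
      = m.set y.toNat ((m.getD y.toNat []).set x.toNat ch) := by
    unfold pvSetRow pvSetAt
    simp only [if_neg hyr, if_pos hylt, if_neg hxr, if_pos hxlt]
  rw [hset]
  refine ⟨by simpa using hH, ?_, ?_⟩
  · intro row hrow
    rcases List.mem_or_eq_of_mem_set hrow with h1 | h1
    · exact hW _ h1
    · subst h1; simpa using hrowlen
  · intro j hj i hi
    have hjlen : j < m.length := by omega
    have hxlt2 : x.toNat < (m.getD y.toNat []).length := by omega
    have hcj := hc j hj i hi
    rw [PySem.Dict.getD_modify]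
    by_cases hjy : y.toNat = j
    · subst hjy
      have hje : ((y.toNat : Nat) : Int) = y := Int.toNat_of_nonneg hy
      rw [if_pos hje, PySem.Dict.getD_insert]
      by_cases hix : x.toNat = i
      · subst hix
        have hie : ((x.toNat : Nat) : Int) = x := Int.toNat_of_nonneg hx
        rw [if_pos hie]
        have hxlt3 : x.toNat < m[y.toNat].length := by
          rwa [List.getD_eq_getElem _ _ hjlen] at hxlt2
        simp [List.getD_eq_getElem?_getD, hjlen, hxlt3]
      · have hie : ((i : Nat) : Int) ≠ x := by omega
        rw [if_neg hie, ← hje, ← hcj]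
        have hmy : max y 0 = y := by omega
        simp [List.getD_eq_getElem?_getD, hjlen, hmy, hix]
    · have hje : ((j : Nat) : Int) ≠ y := by omega
      rw [if_neg hje, ← hcj]
      simp [List.getD_eq_getElem?_getD, hjy]

theorem pvInv_fold (mx my : Int) (t : List ((Int × Int) × String))
    (hb : ∀ p ∈ t, 0 ≤ p.1.1 ∧ p.1.1 ≤ mx ∧ 0 ≤ p.1.2 ∧ p.1.2 ≤ my) :
    ∀ (m : List (List String)) (rows : PySem.Dict Int (PySem.Dict Int String)),
    pvInv mx my m rows →
    pvInv mx my (t.foldl (fun m p => pvSetRow m p.1.2 p.1.1 p.2) m)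
      (t.foldl (fun d p =>
        d.modify p.1.2 PySem.Dict.empty (fun r => r.insert p.1.1 p.2)) rows) := by
  induction t with
  | nil => intro m d h; exact h
  | cons q t ih =>
    intro m d h
    obtain ⟨hq1, hq2, hq3, hq4⟩ := hb q (by simp)
    simp only [List.foldl_cons]
    exact ih (fun p hp => hb p (by simp [hp])) _ _
      (pvInv_step mx my q.1.1 q.1.2 q.2 m d hq1 hq2 hq3 hq4 h)

theorem pvInv_init (mx my : Int) :
    pvInv mx my ((List.range (my + 1).toNat).map (fun _ =>
      (List.range (mx + 1).toNat).map (fun _ => " "))) PySem.Dict.empty := by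
  refine ⟨by simp, ?_, ?_⟩
  · intro row hrow
    simp only [List.mem_map] at hrow
    obtain ⟨_, _, hr⟩ := hrow
    simp [← hr]
  · intro j hj i hi
    have h1 : j < ((List.range (my + 1).toNat).map (fun _ =>
        (List.range (mx + 1).toNat).map (fun _ => " "))).length := by simpa using hj
    rw [List.getD_eq_getElem _ _ h1]
    simp only [List.getElem_map]
    have h2 : i < ((List.range (mx + 1).toNat).map (fun _ => " ")).length := by simpa using hi
    rw [List.getD_eq_getElem _ _ h2]
    simp [PySem.Dict.getD_empty]

-- Every inner row dict keeps Nodup keys through B's grouping fold.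
theorem pvRows_nodup (t : List ((Int × Int) × String)) :
    ∀ (rows : PySem.Dict Int (PySem.Dict Int String)),
    (∀ y, (rows.getD y PySem.Dict.empty).keys.Nodup) →
    ∀ y, ((t.foldl (fun d p =>
        d.modify p.1.2 PySem.Dict.empty (fun r => r.insert p.1.1 p.2)) rows).getD
          y PySem.Dict.empty).keys.Nodup := by
  induction t with
  | nil => intro rows h y; exact h y
  | cons q t ih =>
    intro rows h y
    simp only [List.foldl_cons]
    refine ih _ (fun y' => ?_) y
    rw [PySem.Dict.getD_modify]
    split_ifs with he
    · exact PySem.Dict.nodup_keys_insert _ _ _ (h _)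
    · exact h _

-- Every key of every inner row dict is one of the inserted x's.
theorem pvRows_bound (mx : Int) (t : List ((Int × Int) × String))
    (hb : ∀ p ∈ t, 0 ≤ p.1.1 ∧ p.1.1 ≤ mx) :
    ∀ (rows : PySem.Dict Int (PySem.Dict Int String)),
    (∀ y x, x ∈ (rows.getD y PySem.Dict.empty).keys → 0 ≤ x ∧ x ≤ mx) →
    ∀ y x, x ∈ ((t.foldl (fun d p =>
        d.modify p.1.2 PySem.Dict.empty (fun r => r.insert p.1.1 p.2)) rows).getD
          y PySem.Dict.empty).keys → 0 ≤ x ∧ x ≤ mx := by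
  induction t with
  | nil => intro rows h y x hx; exact h y x hx
  | cons q t ih =>
    intro rows h y x hx
    simp only [List.foldl_cons] at hx
    refine ih (fun p hp => hb p (by simp [hp])) _ (fun y' x' hx' => ?_) y x hx
    rw [PySem.Dict.getD_modify] at hx'
    split_ifs at hx' with he
    · rcases (PySem.Dict.mem_keys_insert _ _ _ _).mp hx' with h1 | h1
      · subst h1; exact ⟨(hb q (by simp)).1, (hb q (by simp)).2⟩
      · exact h _ _ h1
    · exact h _ _ hx'

-- ''.join with empty separator is list flatten (char level).
theorem pvJoin_empty (l : List (List Char)) :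
    PySem.Chars.join [] l = l.flatten := by
  match l with
  | [] => simp [PySem.Chars.join_nil]
  | [p] => simp [PySem.Chars.join_singleton]
  | p :: q :: rest =>
    rw [PySem.Chars.join_cons_cons, pvJoin_empty (q :: rest)]
    simp

-- A run of cells that all hold " " prints as a run of spaces.
theorem pvFlatten_const (l : List Int) (h : Int → String)
    (hc : ∀ x ∈ l, h x = " ") :
    ((l.map (fun x => (h x).toList)).flatten) = List.replicate l.length ' ' := by
  induction l with
  | nil => simp
  | cons a t ih =>
    simp only [List.map_cons, List.flatten_cons, List.length_cons, List.replicate_succ]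
    rw [hc a (by simp), ih (fun x hx => hc x (by simp [hx]))]
    rfl

theorem pvSpaces_toList (n : Int) : (pvSpaces n).toList = List.replicate n.toNat ' ' := by
  simp [pvSpaces, PySem.List.pyRepeat_singleton]

-- The recursive shape of B's inner loop (used only by the proofs).
def pvScanParts (mx : Int) (cur : Int) : List (Int × String) → List String
  | [] => [pvSpaces (mx + 1 - cur)]
  | (x, ch) :: t => pvSpaces (x - cur) :: ch :: pvScanParts mx (x + 1) t

theorem pvFoldl_scan (mx : Int) (its : List (Int × String)) :
    ∀ (acc : List String) (cur : Int),
    (its.foldl (fun (st : List String × Int) kv =>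
        (st.1 ++ [pvSpaces (kv.1 - st.2), kv.2], kv.1 + 1)) (acc, cur)).1
      ++ [pvSpaces (mx + 1 -
        (its.foldl (fun (st : List String × Int) kv =>
          (st.1 ++ [pvSpaces (kv.1 - st.2), kv.2], kv.1 + 1)) (acc, cur)).2)]
      = acc ++ pvScanParts mx cur its := by
  induction its with
  | nil => intro acc cur; simp [pvScanParts]
  | cons q t ih =>
    intro acc cur
    simp only [List.foldl_cons]
    rw [ih]
    simp [pvScanParts]

-- The sparse gap scan of a strictly x-sorted row prints exactly the dense row.
theorem pvScan_eq (mx : Int) (g : Int → String) :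
    ∀ (its : List (Int × String)) (cur : Int), cur ≤ mx + 1 →
    its.Pairwise (fun a b => a.1 < b.1) →
    (∀ p ∈ its, cur ≤ p.1 ∧ p.1 ≤ mx) →
    (∀ p ∈ its, g p.1 = p.2) →
    (∀ x, cur ≤ x → x ≤ mx → x ∉ its.map Prod.fst → g x = " ") →
    ((pvScanParts mx cur its).map String.toList).flatten =
      (((PySem.List.pyRange cur (mx + 1) 1).map (fun x => (g x).toList)).flatten) := by
  intro its
  induction its with
  | nil =>
    intro cur hcur _ _ _ hout
    simp only [pvScanParts, List.map_cons, List.map_nil, List.flatten_cons, List.flatten_nil,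
      List.append_nil]
    rw [pvSpaces_toList, pvFlatten_const _ g (fun x hx => by
      have hm := PySem.List.mem_pyRange_one.mp hx
      exact hout x hm.1 (by omega) (by simp)), PySem.List.length_pyRange_one]
  | cons q t ih =>
    intro cur hcur hpw hin hg hout
    obtain ⟨x, ch⟩ := q
    rw [List.pairwise_cons] at hpw
    obtain ⟨hqc, hqm⟩ := hin (x, ch) (by simp)
    have hsplit : PySem.List.pyRange cur (mx + 1) 1
        = PySem.List.pyRange cur x 1 ++ PySem.List.pyRange x (x + 1) 1
          ++ PySem.List.pyRange (x + 1) (mx + 1) 1 := by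
      rw [PySem.List.pyRange_one_append cur x (mx + 1) (by omega) (by omega),
        PySem.List.pyRange_one_append x (x + 1) (mx + 1) (by omega) (by omega),
        List.append_assoc]
    rw [hsplit]
    simp only [List.map_append, List.flatten_append, pvScanParts, List.map_cons,
      List.flatten_cons, PySem.List.pyRange_one_singleton, List.map_nil, List.flatten_nil,
      List.append_nil]
    rw [pvSpaces_toList, hg (x, ch) (by simp)]
    rw [pvFlatten_const _ g (fun y hy => by
      have hm := PySem.List.mem_pyRange_one.mp hy
      refine hout y hm.1 (by omega) ?_
      simp only [List.map_cons, List.mem_cons]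
      push Not
      refine ⟨by omega, fun hmem => ?_⟩
      obtain ⟨p, hp, hpy⟩ := List.mem_map.mp hmem
      have := hpw.1 p hp
      omega), PySem.List.length_pyRange_one]
    rw [ih (x + 1) (by omega) hpw.2 (fun p hp => ⟨by have := hpw.1 p hp; omega,
        (hin p (by simp [hp])).2⟩) (fun p hp => hg p (by simp [hp]))
      (fun y hy1 hy2 hy3 => hout y (by omega) hy2 (by
        simp only [List.map_cons, List.mem_cons]
        push Not
        exact ⟨by omega, hy3⟩))]
    simp [List.append_assoc]

-- A dense row and B's sorted sparse scan of the same row dict print the same line.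
theorem pvLine_eq (mx : Int) (hmx0 : 0 ≤ mx) (r : PySem.Dict Int String)
    (hnd : r.keys.Nodup) (hb : ∀ x ∈ r.keys, 0 ≤ x ∧ x ≤ mx)
    (row : List String) (hrl : row.length = (mx + 1).toNat)
    (hcell : ∀ i, i < (mx + 1).toNat → row.getD i " " = r.getD (i : Int) " ") :
    PySem.Str.join "" row =
    PySem.Str.join ""
      (((PySem.List.sorted r.items (fun kv => kv.1)).foldl
          (fun (st : List String × Int) kv =>
            (st.1 ++ [pvSpaces (kv.1 - st.2), kv.2], kv.1 + 1)) ([], 0)).1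
        ++ [pvSpaces (mx + 1 -
          ((PySem.List.sorted r.items (fun kv => kv.1)).foldl
            (fun (st : List String × Int) kv =>
              (st.1 ++ [pvSpaces (kv.1 - st.2), kv.2], kv.1 + 1)) ([], 0)).2)]) := by
  have hits : ∀ p ∈ PySem.List.sorted r.items (fun kv => kv.1), p ∈ r.items :=
    fun p hp => (PySem.List.mem_sorted _ _ _ _).mp hp
  have hperm : ((PySem.List.sorted r.items (fun kv => kv.1)).map Prod.fst).Perm r.keys := by
    have := (PySem.List.sorted_perm r.items (fun kv => kv.1) false).map Prod.fst
    simpa [PySem.Dict.keys] using this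
  have hndm : ((PySem.List.sorted r.items (fun kv => kv.1)).map Prod.fst).Nodup :=
    hperm.nodup_iff.mpr hnd
  have hpair : (PySem.List.sorted r.items (fun kv => kv.1)).Pairwise
      (fun a b => a.1 < b.1) := by
    have hle := PySem.List.sorted_pairwise r.items (fun kv => kv.1)
    have hne : (PySem.List.sorted r.items (fun kv => kv.1)).Pairwise
        (fun a b => a.1 ≠ b.1) := by
      rw [List.nodup_iff_pairwise_ne, List.pairwise_map] at hndm
      exact hndm
    exact (hle.and hne).imp (fun h => by omega)
  have hinb : ∀ p ∈ PySem.List.sorted r.items (fun kv => kv.1), 0 ≤ p.1 ∧ p.1 ≤ mx := by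
    intro p hp
    exact hb p.1 (PySem.Dict.mem_keys_of_mem_items r (hits p hp))
  have hgb : ∀ p ∈ PySem.List.sorted r.items (fun kv => kv.1),
      r.getD p.1 " " = p.2 := by
    intro p hp
    exact PySem.Dict.getD_of_mem_items r (hits p hp) hnd " "
  have houtb : ∀ x, (0 : Int) ≤ x → x ≤ mx →
      x ∉ (PySem.List.sorted r.items (fun kv => kv.1)).map Prod.fst →
      r.getD x " " = " " := by
    intro x _ _ hx
    have hxk : x ∉ r.keys := fun hk => hx (hperm.mem_iff.mpr hk)
    refine PySem.Dict.getD_of_not_contains r " " ?_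
    cases hcon : r.contains x with
    | false => rfl
    | true => exact absurd ((PySem.Dict.contains_iff_mem_keys r x).mp hcon) hxk
  apply String.toList_inj.mp
  rw [pvFoldl_scan mx _ [] 0, List.nil_append, PySem.Str.toList_join, PySem.Str.toList_join]
  have hsep : ("" : String).toList = [] := rfl
  rw [hsep, pvJoin_empty, pvJoin_empty]
  have hA : row.map String.toList
      = (PySem.List.pyRange 0 (mx + 1) 1).map (fun x => (r.getD x " ").toList) := by
    apply List.ext_getElem
    · simp [hrl, PySem.List.length_pyRange_one]
    · intro i hi1 hi2
      simp only [List.getElem_map, PySem.List.getElem_pyRange_one]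
      have hi : i < (mx + 1).toNat := by simpa [hrl] using hi1
      have hc := hcell i hi
      rw [List.getD_eq_getElem _ _ (by omega : i < row.length)] at hc
      rw [hc]
      norm_num
  rw [hA]
  exact (pvScan_eq mx (fun x => r.getD x " ") _ 0 (by omega) hpair hinb hgb houtb).symm

-- ===== VERDICT (by name: the statement is the Claim_ definition above) =====
theorem reconstruct_2d_matrix_spec : Claim_equal_reconstruct_2d_matrix := by
  intro results _ hpre
  obtain ⟨hne, hnn⟩ := hpre
  unfold Spec_reconstruct_2d_matrix
  cases results with
  | nil => exact absurd rfl hne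
  | cons q t =>
    unfold reconstruct_2d_matrix reconstruct_2d_matrix_alt
    simp only [List.map_map, Function.comp_def, List.map_cons, PySem.List.max?_id_cons]
    set mx := List.foldl max q.1.1 (t.map (fun p => p.1.1)) with hmx
    set my := List.foldl max q.1.2 (t.map (fun p => p.1.2)) with hmy
    have hmx_max : ∀ p ∈ q :: t, p.1.1 ≤ mx := by
      intro p hp
      rcases List.mem_cons.mp hp with h | h
      · rw [h]; exact (PySem.List.le_foldl_max (t.map (fun p => p.1.1)) q.1.1).1
      · exact (PySem.List.le_foldl_max (t.map (fun p => p.1.1)) q.1.1).2 _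
          (List.mem_map_of_mem h)
    have hmy_max : ∀ p ∈ q :: t, p.1.2 ≤ my := by
      intro p hp
      rcases List.mem_cons.mp hp with h | h
      · rw [h]; exact (PySem.List.le_foldl_max (t.map (fun p => p.1.2)) q.1.2).1
      · exact (PySem.List.le_foldl_max (t.map (fun p => p.1.2)) q.1.2).2 _
          (List.mem_map_of_mem h)
    have hmx0 : 0 ≤ mx := le_trans (hnn q (by simp)).1 (hmx_max q (by simp))
    have hmy0 : 0 ≤ my := le_trans (hnn q (by simp)).2 (hmy_max q (by simp))
    have hinv := pvInv_fold mx my (q :: t)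
      (fun p hp => ⟨(hnn p hp).1, hmx_max p hp, (hnn p hp).2, hmy_max p hp⟩)
      _ PySem.Dict.empty (pvInv_init mx my)
    obtain ⟨hlen, hwid, hcell⟩ := hinv
    have hnodup := pvRows_nodup (q :: t) PySem.Dict.empty
      (fun y => by simp [PySem.Dict.getD_empty, PySem.Dict.keys_empty])
    have hbound := pvRows_bound mx (q :: t)
      (fun p hp => ⟨(hnn p hp).1, hmx_max p hp⟩) PySem.Dict.empty
      (fun y x hx => by simp [PySem.Dict.getD_empty, PySem.Dict.keys_empty] at hx)
    rw [PySem.List.foldl_append_singleton_eq_map, List.nil_append]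
    congr 1
    apply List.ext_getElem
    · rw [List.length_map, List.length_map, hlen, PySem.List.length_pyRange_one]
      omega
    · intro j h1 h2
      rw [List.length_map] at h1
      have hjH : j < (my + 1).toNat := hlen ▸ h1
      simp only [List.getElem_map, PySem.List.getElem_pyRange_one, zero_add]
      rw [← List.getD_eq_getElem _ [] h1]
      exact pvLine_eq mx hmx0 _ (hnodup (j : Int)) (hbound (j : Int)) _
        (hwid _ (by rw [List.getD_eq_getElem _ _ h1]; exact List.getElem_mem h1))
        (fun i hi => hcell j hjH i hi)
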